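-- pv_equiv track=rewrite | github.com/allan-max/datasheetget | scrapers/martins.py | limpar_descricao_martins
-- ===== SOURCE A (Python) =====
-- def limpar_descricao_martins(texto_bruto):
--     if not texto_bruto: return ""
--
--     linhas = texto_bruto.splitlines()
--     linhas_limpas = []
--
--     frases_banidas = [
--         "garantia",
--         "fornecedor",
--         "imagens meramente ilustrativas"
--     ]
--
--     for linha in linhas:
--         linha_clean = linha.strip()
--         if not linha_clean:
--             if linhas_limpas and linhas_limpas[-1] != "": linhas_limpas.append("")
--             continue
--
--         linha_lower = linha_clean.lower()
--
--         # Remove linhas de garantia conforme solicitado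
--         if any(banida in linha_lower for banida in frases_banidas):
--             continue
--
--         # Remove linhas que sejam apenas "Características do Produto" (pois já vai pra ficha técnica)
--         if "características do produto" in linha_lower:
--             continue
--
--         linhas_limpas.append(linha_clean)
--
--     return "\n".join(linhas_limpas)
-- ===== SOURCE B (Python) =====
-- def limpar_descricao_martins(texto_bruto):
--     if not texto_bruto:
--         return ""
--
--     frases_banidas = (
--         "garantia",
--         "fornecedor",
--         "imagens meramente ilustrativas",
--         "caracter\u00edsticas do produto",
--     )
--
--     # Pass 1: strip every line, then drop the banned ones entirely.
--     tokens = [linha.strip() for linha in texto_bruto.splitlines()]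
--     tokens = [t for t in tokens
--               if t == "" or not any(b in t.lower() for b in frases_banidas)]
--
--     # Pass 2: keep a blank token only when its predecessor is non-blank
--     # (drops leading blanks and collapses runs of blanks to one).
--     mantidas = [t for t, prev in zip(tokens, [""] + tokens)
--                 if t != "" or prev != ""]
--
--     return "\n".join(mantidas)
-- ===== Notes on version B (the rewrite author's own statement) =====
-- stated objective: alternative
-- what changed: Replaces A's single stateful loop (appending into a list whose last element is inspected to gate blank lines) by a stateless three-stage pipeline: strip+filter banned lines into a token list, then keep each token by comparing it with its predecessor via zip (dropping leading blanks and collapsing blank runs), then join.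
import Mathlib
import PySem

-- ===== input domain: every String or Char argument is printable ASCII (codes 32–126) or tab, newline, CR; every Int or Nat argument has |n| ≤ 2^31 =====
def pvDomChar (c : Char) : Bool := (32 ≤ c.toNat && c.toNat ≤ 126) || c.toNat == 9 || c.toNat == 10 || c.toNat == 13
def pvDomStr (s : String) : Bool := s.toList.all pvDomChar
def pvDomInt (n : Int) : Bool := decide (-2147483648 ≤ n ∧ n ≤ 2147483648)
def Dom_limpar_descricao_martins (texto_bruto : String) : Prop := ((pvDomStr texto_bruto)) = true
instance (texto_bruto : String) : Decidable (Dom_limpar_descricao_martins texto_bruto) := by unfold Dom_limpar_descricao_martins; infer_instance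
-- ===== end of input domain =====

-- B replaces A's single stateful loop (inspecting the output list's last element to gate blank
-- lines) by a stateless pipeline: strip+filter the lines into tokens, then keep each token by
-- comparing it with its predecessor via zip, then join.  Objective: alternative decomposition.

-- ===== PORT A =====
def pvFrasesBanidasA : List String := ["garantia", "fornecedor", "imagens meramente ilustrativas"]

-- body of A's loop after 'linha_clean = linha.strip()'; 'linhas_limpas[-1]' on a list
-- guarded nonempty is its last element, ported as getLast?
def pvStepACore (acc : List String) (linha_clean : String) : List String :=
  if linha_clean = "" then
    (if acc ≠ [] ∧ acc.getLast? ≠ some "" then acc ++ [""] else acc)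
  else
    let linha_lower := PySem.Str.lower linha_clean
    if pvFrasesBanidasA.any (fun banida => PySem.Str.isIn banida linha_lower) then acc
    else if PySem.Str.isIn "características do produto" linha_lower then acc
    else acc ++ [linha_clean]

def limpar_descricao_martins (texto_bruto : String) : String :=
  if texto_bruto = "" then ""
  else
    PySem.Str.join "\n"
      ((PySem.Str.splitlines texto_bruto).foldl
        (fun acc linha => pvStepACore acc (PySem.Str.strip linha)) [])

-- ===== PORT B =====
def pvFrasesBanidasB : List String :=
  ["garantia", "fornecedor", "imagens meramente ilustrativas", "características do produto"]

def pvBanidaB (t : String) : Bool :=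
  pvFrasesBanidasB.any (fun b => PySem.Str.isIn b (PySem.Str.lower t))

def limpar_descricao_martins_alt (texto_bruto : String) : String :=
  if texto_bruto = "" then ""
  else
    let tokens0 := (PySem.Str.splitlines texto_bruto).map PySem.Str.strip
    let tokens := tokens0.filter (fun t => (t == "") || !pvBanidaB t)
    let mantidas :=
      ((tokens.zip ("" :: tokens)).filter (fun p => (p.1 != "") || (p.2 != ""))).map Prod.fst
    PySem.Str.join "\n" mantidas

-- ===== PRECONDITION & SPEC =====
def Spec_limpar_descricao_martins (texto_bruto : String) (out : String) : Prop := out = limpar_descricao_martins_alt texto_bruto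
instance (texto_bruto : String) (out : String) : Decidable (Spec_limpar_descricao_martins texto_bruto out) := by unfold Spec_limpar_descricao_martins; infer_instance

-- ===== CLAIM (what is proved, stated in full; the proofs are below) =====
def Claim_equal_limpar_descricao_martins : Prop := ∀ (texto_bruto : String), Dom_limpar_descricao_martins texto_bruto → Spec_limpar_descricao_martins texto_bruto (limpar_descricao_martins texto_bruto)

-- ===== LEMMAS AND PROOFS =====

-- B's keep-predicate on a token
def pvKeep (t : String) : Bool := (t == "") || !pvBanidaB t

-- A's step on a kept token (the banned branches removed)
def pvStepB (acc : List String) (t : String) : List String :=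
  if t = "" then (if acc ≠ [] ∧ acc.getLast? ≠ some "" then acc ++ [""] else acc)
  else acc ++ [t]

-- A's step equals: do pvStepB when kept, skip otherwise
lemma stepACore_eq (acc : List String) (t : String) :
    pvStepACore acc t = if pvKeep t then pvStepB acc t else acc := by
  unfold pvStepACore pvStepB pvKeep pvBanidaB pvFrasesBanidasA pvFrasesBanidasB
  by_cases h : t = ""
  · simp [h]
  · simp only [List.any_cons, List.any_nil, h]
    split_ifs <;> simp_all

-- the zip-with-predecessor normalization of B, as a function of the previous token
def pvNorm (prev : String) (ts : List String) : List String :=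
  ((ts.zip (prev :: ts)).filter (fun p => (p.1 != "") || (p.2 != ""))).map Prod.fst

-- loop invariant: A's fold over kept tokens builds exactly acc ++ pvNorm prev ts,
-- where prev records whether the output may currently accept a blank
lemma foldl_stepB_eq (ts : List String) :
    ∀ (acc : List String) (prev : String),
      ((acc ≠ [] ∧ acc.getLast? ≠ some "") ↔ prev ≠ "") →
      ts.foldl pvStepB acc = acc ++ pvNorm prev ts := by
  induction ts with
  | nil => intro acc prev _; simp [pvNorm]
  | cons t rest ih =>
    intro acc prev hinv
    by_cases ht : t = ""
    · subst ht
      by_cases hp : prev = ""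
      · have hacc : ¬ (acc ≠ [] ∧ acc.getLast? ≠ some "") := by
          rw [hinv]; simp [hp]
        have hstep : pvStepB acc "" = acc := by simp [pvStepB, hacc]
        rw [List.foldl_cons, hstep, ih acc "" (by simpa using hacc)]
        simp [pvNorm, hp]
      · have hacc : acc ≠ [] ∧ acc.getLast? ≠ some "" := hinv.mpr hp
        have hstep : pvStepB acc "" = acc ++ [""] := by simp [pvStepB, hacc]
        rw [List.foldl_cons, hstep, ih (acc ++ [""]) "" (by simp)]
        simp [pvNorm, hp]
    · have hstep : pvStepB acc t = acc ++ [t] := by simp [pvStepB, ht]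
      rw [List.foldl_cons, hstep, ih (acc ++ [t]) t (by simp [ht])]
      simp [pvNorm, ht]

theorem limpar_descricao_martins_eq (texto_bruto : String) :
    limpar_descricao_martins texto_bruto = limpar_descricao_martins_alt texto_bruto := by
  unfold limpar_descricao_martins limpar_descricao_martins_alt
  by_cases h : texto_bruto = ""
  · simp [h]
  · simp only [if_neg h]
    congr 1
    rw [← List.foldl_map (f := PySem.Str.strip) (g := pvStepACore)]
    set toks0 := (PySem.Str.splitlines texto_bruto).map PySem.Str.strip with htoks
    calc toks0.foldl pvStepACore []
        = toks0.foldl (fun acc t => if pvKeep t then pvStepB acc t else acc) [] := by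
          apply PySem.List.foldl_congr_mem
          intro acc x _
          exact stepACore_eq acc x
      _ = (toks0.filter pvKeep).foldl pvStepB [] := by
          exact PySem.List.foldl_if_eq_foldl_filter pvKeep pvStepB toks0 []
      _ = pvNorm "" (toks0.filter pvKeep) := by
          exact foldl_stepB_eq _ [] "" (by simp)
      _ = _ := by rfl

-- ===== VERDICT (by name: the statement is the Claim_ definition above) =====
theorem limpar_descricao_martins_spec : Claim_equal_limpar_descricao_martins := by
  intro texto_bruto _
  exact limpar_descricao_martins_eq texto_bruto
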